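-- pv_equiv track=rewrite | github.com/aorursy/KT_dataset_py | sohaibanwaar1203_sequence-classification-using-machine-learning.py | AAPIV
-- ===== SOURCE A (Python) =====
-- def AAPIV(seq):
--
--     encoder = ['A', 'C', 'D', 'E', 'F', 'G', 'H', 'I', 'K', 'L', 'M', 'N', 'P', 'Q', 'R', 'S', 'T', 'V', 'W',
--
--                'Y']
--
--     apv = [0 for x in range(20)]
--
--     i = 1
--
--     sum = 0
--
--     for i in range(20):
--
--         j = 0
--
--         for j in range(len(seq)):
--
--             if seq[j] == encoder[i]:
--
--                 sum = sum + j + 1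
--
--         apv[i] = sum
--
--         sum = 0
--
--     return apv[1:] + apv[0:1]
-- ===== SOURCE B (Python) =====
-- def AAPIV(seq):
--     enc = "ACDEFGHIKLMNPQRSTVWY"
--     index = {c: i for i, c in enumerate(enc)}
--     sums = [0] * 20
--     for pos, ch in enumerate(seq, 1):
--         k = index.get(ch)
--         if k is not None:
--             sums[k] += pos
--     first, *rest = sums
--     return rest + [first]
-- ===== Notes on version B (the rewrite author's own statement) =====
-- stated objective: faster
-- what changed: Replaces A's 20 full rescans of the sequence (one per amino acid) with one enumerate pass that accumulates each 1-based position into a length-20 array via a precomputed char->index map, then rotates the array.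
import Mathlib
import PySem

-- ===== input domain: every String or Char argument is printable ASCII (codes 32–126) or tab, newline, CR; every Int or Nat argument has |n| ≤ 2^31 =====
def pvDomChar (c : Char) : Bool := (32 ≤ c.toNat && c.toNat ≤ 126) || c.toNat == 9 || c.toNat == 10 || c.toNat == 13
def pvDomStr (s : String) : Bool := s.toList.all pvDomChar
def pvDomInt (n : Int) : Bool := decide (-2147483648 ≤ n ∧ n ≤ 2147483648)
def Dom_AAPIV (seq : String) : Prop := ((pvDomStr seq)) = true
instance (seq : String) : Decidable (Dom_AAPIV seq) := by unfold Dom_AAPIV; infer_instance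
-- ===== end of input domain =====

-- B replaces A's 20 full rescans of the sequence by one enumerate pass accumulating 1-based positions into a length-20 array through a char->index map built once.

-- ===== PORT A =====
def AAPIV (seq : String) : List Int :=
  let encoder : List Char := ['A','C','D','E','F','G','H','I','K','L','M','N','P','Q','R','S','T','V','W','Y']
  let apv0 : List Int := (PySem.List.pyRange 0 20 1).map (fun _ => (0 : Int))
  let apv := (PySem.List.pyRange 0 20 1).foldl (fun apv i =>
      let sum := (PySem.List.pyRange 0 (PySem.Str.len seq) 1).foldl (fun sum j =>
          if PySem.Str.pyGet? seq j = PySem.List.pyGet? encoder i then sum + j + 1 else sum) 0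
      PySem.List.pySetD apv i sum) apv0
  PySem.List.slice apv (some 1) none ++ PySem.List.slice apv (some 0) (some 1)

-- ===== PORT B =====
def AAPIV_alt (seq : String) : List Int :=
  let enc : String := "ACDEFGHIKLMNPQRSTVWY"
  let index : PySem.Dict Char Int :=
    (PySem.List.enumerate enc.toList 0).foldl (fun d p => d.insert p.2 p.1) PySem.Dict.empty
  let sums0 : List Int := List.replicate 20 (0 : Int)
  let sums := (PySem.List.enumerate seq.toList 1).foldl
    (fun sums p =>
      match index.get? p.2 with
      | some k =>
        -- sums[k] += pos : the read sums[k] never fails (0 ≤ k < 20 = len sums)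
        match PySem.List.pyGet? sums k with
        | some v => PySem.List.pySetD sums k (v + p.1)
        | none => sums
      | none => sums) sums0
  -- first, *rest = sums; return rest + [first]  (sums has length 20, never empty)
  match sums with
  | f :: rest => rest ++ [f]
  | [] => []

-- ===== PRECONDITION & SPEC =====
def Spec_AAPIV (seq : String) (out : List Int) : Prop := out = AAPIV_alt seq
instance (seq : String) (out : List Int) : Decidable (Spec_AAPIV seq out) := by unfold Spec_AAPIV; infer_instance

-- ===== CLAIM (what is proved, stated in full; the proofs are below) =====
def Claim_equal_AAPIV : Prop := ∀ (seq : String), Dom_AAPIV seq → Spec_AAPIV seq (AAPIV seq)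

-- ===== LEMMAS AND PROOFS =====

def pvEncL : List Char := ['A','C','D','E','F','G','H','I','K','L','M','N','P','Q','R','S','T','V','W','Y']

def posVal (c : Char) (p : Int × Char) : Int := if p.2 = c then p.1 + 1 else 0

def pvS (c : Char) (seq : String) : Int := ((PySem.List.enumerate seq.toList 0).map (posVal c)).sum

-- ---------- A side ----------

theorem fold_set (g : Int → Int) : ∀ (n : Nat) (init : List Int), n ≤ init.length →
  (PySem.List.pyRange 0 (n:Int) 1).foldl (fun apv i => PySem.List.pySetD apv i (g i)) init
  = (PySem.List.pyRange 0 (n:Int) 1).map g ++ init.drop n := by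
  intro n
  induction n with
  | zero => intro init h; simp [PySem.List.pyRange_one_eq_nil]
  | succ n ih =>
    intro init h
    have h1 : (((n+1:Nat)):Int) = ((n:Int)+1) := by push_cast; ring
    rw [h1, PySem.List.pyRange_one_succ_right (by positivity), List.foldl_append, List.map_append]
    rw [ih init (by omega)]
    simp only [List.foldl_cons, List.foldl_nil, List.map_cons, List.map_nil]
    rw [PySem.List.pySetD_natCast]
    have hn : n < init.length := by omega
    have hl : ((PySem.List.pyRange 0 (n:Int) 1).map g).length = n := by
      simp [PySem.List.length_pyRange_one]
    rw [List.set_append_right _ _ (by omega)]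
    simp only [hl, Nat.sub_self]
    rw [List.drop_eq_getElem_cons hn, List.set_cons_zero]
    simp [List.append_assoc]

theorem idx_shift (full : List Char) (c : Char) : ∀ (t : List Char) (a : Nat) (acc : Int),
  full.drop a = t →
  (PySem.List.pyRange (a:Int) (full.length:Int) 1).foldl
     (fun s j => if PySem.List.pyGet? full j = some c then s + j + 1 else s) acc
  = acc + ((PySem.List.enumerate t (a:Int)).map (posVal c)).sum := by
  intro t
  induction t with
  | nil =>
    intro a acc h
    have : full.length ≤ a := List.drop_eq_nil_iff.mp h
    rw [PySem.List.pyRange_one_eq_nil (by exact_mod_cast this)]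
    simp [PySem.List.enumerate]
  | cons x t ih =>
    intro a acc h
    have ha : a < full.length := by
      by_contra hle
      rw [List.drop_eq_nil_iff.mpr (by omega)] at h; simp at h
    have hx : full[a]? = some x := by
      have : (full.drop a)[0]? = full[a+0]? := List.getElem?_drop
      rw [h] at this; simpa using this.symm
    rw [PySem.List.pyRange_one_cons (by exact_mod_cast ha)]
    simp only [List.foldl_cons, PySem.List.enumerate_cons, List.map_cons, List.sum_cons]
    have hdrop : full.drop (a+1) = t := by rw [← List.tail_drop, h]; rfl
    have hcast : ((a:Int)+1) = ((a+1:Nat):Int) := by push_cast; ring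
    rw [PySem.List.pyGet?_natCast, hx, hcast, ih (a+1) _ hdrop]
    simp only [posVal, Option.some.injEq]
    push_cast
    split_ifs <;> ring

theorem A_sum (seq : String) (c : Char) :
  (PySem.List.pyRange 0 (PySem.Str.len seq) 1).foldl
      (fun s j => if PySem.Str.pyGet? seq j = some c then s + j + 1 else s) 0
  = pvS c seq := by
  have hi := idx_shift seq.toList c seq.toList 0 0 rfl
  simp only [Nat.cast_zero, zero_add] at hi
  rw [pvS, ← hi]
  simp only [PySem.Str.pyGet?_eq, PySem.Str.len_eq, String.length_toList]
  rfl

theorem A_closed (seq : String) :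
  AAPIV seq = [pvS 'C' seq, pvS 'D' seq, pvS 'E' seq, pvS 'F' seq, pvS 'G' seq, pvS 'H' seq,
               pvS 'I' seq, pvS 'K' seq, pvS 'L' seq, pvS 'M' seq, pvS 'N' seq, pvS 'P' seq,
               pvS 'Q' seq, pvS 'R' seq, pvS 'S' seq, pvS 'T' seq, pvS 'V' seq, pvS 'W' seq,
               pvS 'Y' seq, pvS 'A' seq] := by
  simp only [AAPIV]
  have h20 : (20:Int) = ((20:Nat):Int) := by norm_num
  rw [h20]
  rw [fold_set (fun i => (PySem.List.pyRange 0 (PySem.Str.len seq) 1).foldl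
      (fun sum j => if PySem.Str.pyGet? seq j = PySem.List.pyGet? ['A','C','D','E','F','G','H','I','K','L','M','N','P','Q','R','S','T','V','W','Y'] i then sum + j + 1 else sum) 0)
      20 _ (by decide)]
  have hdrop : (((PySem.List.pyRange 0 ((20:Nat):Int) 1).map (fun _ => (0:Int))).drop 20) = [] := by decide
  rw [hdrop, List.append_nil]
  have hr : PySem.List.pyRange 0 ((20:Nat):Int) 1 = [0,1,2,3,4,5,6,7,8,9,10,11,12,13,14,15,16,17,18,19] := by decide
  rw [hr]
  simp only [List.map_cons, List.map_nil]
  simp only [show ∀ i : Int, PySem.List.pyGet? ['A','C','D','E','F','G','H','I','K','L','M','N','P','Q','R','S','T','V','W','Y'] i = PySem.List.pyGet? pvEncL i from fun _ => rfl]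
  simp only [show PySem.List.pyGet? pvEncL 0 = some 'A' from rfl, show PySem.List.pyGet? pvEncL 1 = some 'C' from rfl, show PySem.List.pyGet? pvEncL 2 = some 'D' from rfl, show PySem.List.pyGet? pvEncL 3 = some 'E' from rfl, show PySem.List.pyGet? pvEncL 4 = some 'F' from rfl, show PySem.List.pyGet? pvEncL 5 = some 'G' from rfl, show PySem.List.pyGet? pvEncL 6 = some 'H' from rfl, show PySem.List.pyGet? pvEncL 7 = some 'I' from rfl, show PySem.List.pyGet? pvEncL 8 = some 'K' from rfl, show PySem.List.pyGet? pvEncL 9 = some 'L' from rfl, show PySem.List.pyGet? pvEncL 10 = some 'M' from rfl, show PySem.List.pyGet? pvEncL 11 = some 'N' from rfl, show PySem.List.pyGet? pvEncL 12 = some 'P' from rfl, show PySem.List.pyGet? pvEncL 13 = some 'Q' from rfl, show PySem.List.pyGet? pvEncL 14 = some 'R' from rfl, show PySem.List.pyGet? pvEncL 15 = some 'S' from rfl, show PySem.List.pyGet? pvEncL 16 = some 'T' from rfl, show PySem.List.pyGet? pvEncL 17 = some 'V' from rfl, show PySem.List.pyGet? pvEncL 18 = some 'W' from rfl, show PySem.List.pyGet?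 pvEncL 19 = some 'Y' from rfl]
  simp only [PySem.List.slice_from_one, PySem.List.slice_zero_start]
  simp only [show ∀ xs : List Int, PySem.List.slice xs none (some 1) = xs.take 1 from fun xs => by simp [PySem.List.slice_to]]
  simp only [List.tail_cons, List.take_succ_cons, List.take_zero, List.cons_append, List.nil_append]
  simp only [A_sum]

-- ---------- B side ----------

def pvLook (c : Char) : Option Int :=
  ((PySem.List.enumerate (("ACDEFGHIKLMNPQRSTVWY" : String).toList) 0).foldl
      (fun d p => d.insert p.2 p.1) PySem.Dict.empty).get? c

theorem pvDict_eq :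
    ((PySem.List.enumerate (("ACDEFGHIKLMNPQRSTVWY" : String).toList) 0).foldl
      (fun d p => d.insert p.2 p.1) PySem.Dict.empty)
    = PySem.Dict.mk [('A',(0:Int)),('C',1),('D',2),('E',3),('F',4),('G',5),('H',6),('I',7),('K',8),('L',9),('M',10),('N',11),('P',12),('Q',13),('R',14),('S',15),('T',16),('V',17),('W',18),('Y',19)] := by
  decide

theorem get?_mem : ∀ (L : List (Char × Int)) (c : Char) (k : Int),
    (PySem.Dict.mk L).get? c = some k → (c, k) ∈ L := by
  intro L
  induction L with
  | nil =>
    intro c k h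
    simp [show (PySem.Dict.mk ([] : List (Char × Int))) = PySem.Dict.empty from rfl,
      PySem.Dict.get?_empty] at h
  | cons p L ih =>
    intro c k h
    obtain ⟨a, v⟩ := p
    rw [PySem.Dict.get?_mk_cons] at h
    by_cases hb : (a == c) = true
    · rw [if_pos hb] at h
      injection h with h'
      subst h'
      have : a = c := by simpa using hb
      subst this
      exact List.mem_cons_self
    · rw [if_neg hb] at h
      exact List.mem_cons_of_mem _ (ih c k h)

theorem pvLook_spec (c : Char) (k : Int) (h : pvLook c = some k) :
    ∃ m : Nat, m < 20 ∧ k = (m : Int) ∧ pvEncL.getD m ' ' = c := by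
  unfold pvLook at h
  rw [pvDict_eq] at h
  have hmem := get?_mem _ c k h
  simp only [List.mem_cons, List.not_mem_nil, or_false] at hmem
  rcases hmem with h|h|h|h|h|h|h|h|h|h|h|h|h|h|h|h|h|h|h|h <;>
    (injection h with h1 h2; subst h1; subst h2) <;>
    first
      | exact ⟨0, by omega, by decide, by decide⟩
      | exact ⟨1, by omega, by decide, by decide⟩
      | exact ⟨2, by omega, by decide, by decide⟩
      | exact ⟨3, by omega, by decide, by decide⟩
      | exact ⟨4, by omega, by decide, by decide⟩
      | exact ⟨5, by omega, by decide, by decide⟩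
      | exact ⟨6, by omega, by decide, by decide⟩
      | exact ⟨7, by omega, by decide, by decide⟩
      | exact ⟨8, by omega, by decide, by decide⟩
      | exact ⟨9, by omega, by decide, by decide⟩
      | exact ⟨10, by omega, by decide, by decide⟩
      | exact ⟨11, by omega, by decide, by decide⟩
      | exact ⟨12, by omega, by decide, by decide⟩
      | exact ⟨13, by omega, by decide, by decide⟩
      | exact ⟨14, by omega, by decide, by decide⟩
      | exact ⟨15, by omega, by decide, by decide⟩
      | exact ⟨16, by omega, by decide, by decide⟩
      | exact ⟨17, by omega, by decide, by decide⟩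
      | exact ⟨18, by omega, by decide, by decide⟩
      | exact ⟨19, by omega, by decide, by decide⟩

theorem pvLook_enc (m : Nat) (hm : m < 20) : pvLook (pvEncL.getD m ' ') = some (m : Int) := by
  interval_cases m <;> rfl

def pvStep (sums : List Int) (p : Int × Char) : List Int :=
  match pvLook p.2 with
  | some k =>
    match PySem.List.pyGet? sums k with
    | some v => PySem.List.pySetD sums k (v + p.1)
    | none => sums
  | none => sums

def pvT (c : Char) (ps : List (Int × Char)) : Int :=
  (ps.map (fun p => if p.2 = c then p.1 else 0)).sum

theorem fold_slot (m : Nat) (hm : m < 20) :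
  ∀ (ps : List (Int × Char)) (sums : List Int), sums.length = 20 →
    (ps.foldl pvStep sums).getD m 0 = sums.getD m 0 + pvT (pvEncL.getD m ' ') ps := by
  intro ps
  induction ps with
  | nil => intro sums h; simp [pvT]
  | cons p ps ih =>
    intro sums h
    simp only [List.foldl_cons]
    have hstep : (pvStep sums p).length = 20 ∧
        (pvStep sums p).getD m 0 = sums.getD m 0 +
          (if p.2 = pvEncL.getD m ' ' then p.1 else 0) := by
      unfold pvStep
      cases hk : pvLook p.2 with
      | none =>
        have hne : p.2 ≠ pvEncL.getD m ' ' := by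
          intro he; rw [he, pvLook_enc m hm] at hk; simp at hk
        exact ⟨h, by rw [if_neg hne, add_zero]⟩
      | some k =>
        obtain ⟨i, hi20, hki, hie⟩ := pvLook_spec p.2 k hk
        subst hki
        dsimp only
        have hget : PySem.List.pyGet? sums (i : Int) = some (sums.getD i 0) := by
          rw [PySem.List.pyGet?_natCast]
          rw [List.getElem?_eq_getElem (by omega), List.getD_eq_getElem _ _ (by omega)]
        rw [hget]
        dsimp only
        simp only [PySem.List.pySetD_natCast]
        refine ⟨by rw [List.length_set]; exact h, ?_⟩
        by_cases hmi : m = i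
        · subst hmi
          rw [if_pos hie.symm]
          rw [List.getD_eq_getElem _ _ (by rw [List.length_set]; omega)]
          rw [List.getElem_set_self]
        · have hne : p.2 ≠ pvEncL.getD m ' ' := by
            intro he
            rw [he, pvLook_enc m hm] at hk
            have hmi' : (m : Int) = (i : Int) := by injection hk
            exact hmi (by exact_mod_cast hmi')
          rw [if_neg hne, add_zero]
          rw [List.getD_eq_getElem _ _ (by rw [List.length_set]; omega),
              List.getElem_set_ne (by omega),
              ← List.getD_eq_getElem _ _ (by omega)]
    rw [ih _ hstep.1, hstep.2]
    simp only [pvT, List.map_cons, List.sum_cons]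
    ring

theorem T_shift (c : Char) : ∀ (xs : List Char) (s : Int),
    pvT c (PySem.List.enumerate xs (s + 1)) = ((PySem.List.enumerate xs s).map (posVal c)).sum := by
  intro xs
  induction xs with
  | nil => intro s; simp [pvT, PySem.List.enumerate_nil]
  | cons x xs ih =>
    intro s
    simp only [PySem.List.enumerate_cons, pvT, List.map_cons, List.sum_cons]
    have hih := ih (s+1)
    simp only [pvT] at hih
    rw [hih]
    simp [posVal]

theorem list20_eq (l : List Int) (h : l.length = 20) :
    l = [l.getD 0 0, l.getD 1 0, l.getD 2 0, l.getD 3 0, l.getD 4 0, l.getD 5 0, l.getD 6 0,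
         l.getD 7 0, l.getD 8 0, l.getD 9 0, l.getD 10 0, l.getD 11 0, l.getD 12 0, l.getD 13 0,
         l.getD 14 0, l.getD 15 0, l.getD 16 0, l.getD 17 0, l.getD 18 0, l.getD 19 0] := by
  apply List.ext_getElem (by simp [h])
  intro n h1 h2
  simp only [h] at h1
  interval_cases n <;> simp [h, List.getD_eq_getElem?_getD]

theorem B_closed (seq : String) :
  AAPIV_alt seq = [pvS 'C' seq, pvS 'D' seq, pvS 'E' seq, pvS 'F' seq, pvS 'G' seq, pvS 'H' seq,
                   pvS 'I' seq, pvS 'K' seq, pvS 'L' seq, pvS 'M' seq, pvS 'N' seq, pvS 'P' seq,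
                   pvS 'Q' seq, pvS 'R' seq, pvS 'S' seq, pvS 'T' seq, pvS 'V' seq, pvS 'W' seq,
                   pvS 'Y' seq, pvS 'A' seq] := by
  have hmain : AAPIV_alt seq =
      match (PySem.List.enumerate seq.toList 1).foldl pvStep (List.replicate 20 (0:Int)) with
      | f :: rest => rest ++ [f]
      | [] => [] := rfl
  rw [hmain]
  have hlen : ∀ (ps : List (Int × Char)) (sums : List Int), sums.length = 20 →
      (ps.foldl pvStep sums).length = 20 := by
    intro ps
    induction ps with
    | nil => intro sums h; simpa using h
    | cons p ps ih =>
      intro sums h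
      simp only [List.foldl_cons]
      apply ih
      unfold pvStep
      cases pvLook p.2 with
      | none => exact h
      | some k =>
        dsimp only
        cases PySem.List.pyGet? sums k with
        | none => exact h
        | some v => simp [h]
  have hT : ∀ m : Nat, m < 20 →
      ((PySem.List.enumerate seq.toList 1).foldl pvStep (List.replicate 20 (0:Int))).getD m 0
      = pvS (pvEncL.getD m ' ') seq := by
    intro m hm
    rw [fold_slot m hm _ _ (by simp)]
    rw [show ((List.replicate 20 (0:Int)).getD m 0) = 0 from by
      rw [List.getD, List.getElem?_replicate]; split <;> rfl]
    rw [show (1 : Int) = 0 + 1 from by ring, T_shift]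
    simp [pvS]
  rw [list20_eq ((PySem.List.enumerate seq.toList 1).foldl pvStep (List.replicate 20 (0:Int)))
      (hlen _ _ (by simp))]
  simp only [hT 0 (by omega), hT 1 (by omega), hT 2 (by omega), hT 3 (by omega), hT 4 (by omega),
    hT 5 (by omega), hT 6 (by omega), hT 7 (by omega), hT 8 (by omega), hT 9 (by omega),
    hT 10 (by omega), hT 11 (by omega), hT 12 (by omega), hT 13 (by omega), hT 14 (by omega),
    hT 15 (by omega), hT 16 (by omega), hT 17 (by omega), hT 18 (by omega), hT 19 (by omega)]
  rfl

-- ===== VERDICT (by name: the statement is the Claim_ definition above) =====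
theorem AAPIV_spec : Claim_equal_AAPIV := by
  intro seq _
  unfold Spec_AAPIV
  rw [A_closed, B_closed]
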